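-- pv_equiv track=rewrite | github.com/Harikrish-89/AlgorithmsPython | arrays/longest_even_odd.py | longest_even_odd
-- ===== SOURCE A (Python) =====
-- def longest_even_odd(arr):
--     curr_len = 1
--     res = 1
--     for idx in range(0,len(arr)-1):
--         if arr[idx]%2==0 and arr[idx+1]%2 == 0:
--             res = max(res, curr_len)
--             curr_len = 1
--         else:
--             curr_len += 1
--     return max(res, curr_len)
-- ===== SOURCE B (Python) =====
-- def longest_even_odd(arr):
--     n = len(arr)
--     breaks = [i for i in range(n - 1) if arr[i] % 2 == 0 and arr[i + 1] % 2 == 0]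
--     boundaries = [-1] + breaks + [n - 1]
--     best = 1
--     for x, y in zip(boundaries, boundaries[1:]):
--         best = max(best, y - x)
--     return best
-- ===== Notes on version B (the rewrite author's own statement) =====
-- stated objective: alternative
-- what changed: Replaces the online running-counter scan by a two-phase decomposition: collect the break positions (two consecutive evens), then take the maximum difference of consecutive boundaries formed by sentinel -1, the breaks, and sentinel n-1.
import Mathlib
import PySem

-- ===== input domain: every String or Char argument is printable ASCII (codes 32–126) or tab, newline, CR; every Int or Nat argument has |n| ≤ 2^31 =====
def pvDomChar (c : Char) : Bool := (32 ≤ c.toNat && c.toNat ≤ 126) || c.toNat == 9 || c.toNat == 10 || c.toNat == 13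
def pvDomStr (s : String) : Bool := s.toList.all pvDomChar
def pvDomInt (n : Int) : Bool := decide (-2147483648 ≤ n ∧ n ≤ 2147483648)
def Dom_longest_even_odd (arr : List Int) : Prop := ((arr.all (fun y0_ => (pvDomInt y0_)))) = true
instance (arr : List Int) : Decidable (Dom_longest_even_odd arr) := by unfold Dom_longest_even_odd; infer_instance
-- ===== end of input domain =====

-- B computes the same value by a two-phase decomposition (break positions, then max boundary difference)
-- instead of A's running counter; same O(n) cost (objective: alternative).

-- ===== PORT A =====
def longest_even_odd (arr : List Int) : Int :=
  let st := (PySem.List.pyRange 0 ((arr.length : Int) - 1) 1).foldl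
    (fun (st : Int × Int) idx =>
      if PySem.Int.mod (PySem.List.pyGetD arr idx 0) 2 = 0 ∧
         PySem.Int.mod (PySem.List.pyGetD arr (idx + 1) 0) 2 = 0 then
        (1, max st.2 st.1)        -- curr_len = 1, res = max res curr_len
      else (st.1 + 1, st.2)) (1, 1)
  max st.2 st.1

-- ===== PORT B =====
def longest_even_odd_alt (arr : List Int) : Int :=
  let n : Int := arr.length
  let breaks := (PySem.List.pyRange 0 (n - 1) 1).filter
    (fun i => decide (PySem.Int.mod (PySem.List.pyGetD arr i 0) 2 = 0 ∧
                      PySem.Int.mod (PySem.List.pyGetD arr (i + 1) 0) 2 = 0))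
  let boundaries := [-1] ++ breaks ++ [n - 1]
  (boundaries.zip (PySem.List.slice boundaries (some 1) none)).foldl
    (fun best xy => max best (xy.2 - xy.1)) 1

-- ===== PRECONDITION & SPEC =====
def Spec_longest_even_odd (arr : List Int) (out : Int) : Prop := out = longest_even_odd_alt arr
instance (arr : List Int) (out : Int) : Decidable (Spec_longest_even_odd arr out) := by unfold Spec_longest_even_odd; infer_instance

-- ===== CLAIM (what is proved, stated in full; the proofs are below) =====
def Claim_equal_longest_even_odd : Prop := ∀ (arr : List Int), Dom_longest_even_odd arr → Spec_longest_even_odd arr (longest_even_odd arr)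

-- ===== LEMMAS AND PROOFS =====

/-- A's loop body, for an arbitrary break test `P`. -/
def pvStep (P : Int → Bool) (st : Int × Int) (i : Int) : Int × Int :=
  if P i then (1, max st.2 st.1) else (st.1 + 1, st.2)

/-- B's second loop: max of consecutive differences, folded over zip with the tail. -/
def pvPairs (r : Int) (bs : List Int) : Int :=
  (bs.zip bs.tail).foldl (fun best xy => max best (xy.2 - xy.1)) r

lemma pvPairs_cons_cons (r x y : Int) (t : List Int) :
    pvPairs r (x :: y :: t) = pvPairs (max r (y - x)) (y :: t) := by
  simp [pvPairs, List.zip]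

lemma pvPairs_pair (r x y : Int) : pvPairs r [x, y] = max r (y - x) := by
  simp [pvPairs, List.zip]

/-- The key invariant: A's fold over a consecutive index range, started with
    curr_len = a - prev, equals the max boundary difference of prev :: breaks ++ [end]. -/
lemma pvMain (P : Int → Bool) (k : Nat) :
    ∀ (a prev r : Int),
      (let st := (PySem.List.pyRange a (a + k) 1).foldl (pvStep P) (a - prev, r)
       max st.2 st.1)
      = pvPairs r (prev :: (PySem.List.pyRange a (a + k) 1).filter P ++ [a + k]) := by
  induction k with
  | zero =>
    intro a prev r
    simp [PySem.List.pyRange_one_eq_nil (le_refl a), pvPairs_pair]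
  | succ k ih =>
    intro a prev r
    have hcons : PySem.List.pyRange a (a + (k + 1 : Nat)) 1
        = a :: PySem.List.pyRange (a + 1) (a + (k + 1 : Nat)) 1 :=
      PySem.List.pyRange_one_cons (by push_cast; omega)
    have hend : a + ((k : Int) + 1) = (a + 1) + k := by ring
    by_cases h : P a
    · have := ih (a + 1) a (max r (a - prev))
      simp only [hcons, List.foldl_cons, List.filter_cons, h, if_pos]
      rw [show pvStep P (a - prev, r) a = ((a + 1) - (a : Int), max r (a - prev)) by
        simp [pvStep, h]]
      push_cast
      rw [hend, this]
      simp only [List.cons_append, pvPairs_cons_cons]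
    · have := ih (a + 1) prev r
      simp only [hcons, List.foldl_cons, List.filter_cons, h]
      rw [show pvStep P (a - prev, r) a = ((a + 1) - prev, r) by
        simp [pvStep, h]; ring]
      push_cast
      rw [hend, this]

-- ===== VERDICT (by name: the statement is the Claim_ definition above) =====
theorem longest_even_odd_spec : Claim_equal_longest_even_odd := by
  intro arr _
  unfold Spec_longest_even_odd longest_even_odd longest_even_odd_alt
  rcases arr with _ | ⟨x, xs⟩
  · decide
  · set arr := x :: xs with harr
    set P : Int → Bool := fun i =>
      decide (PySem.Int.mod (PySem.List.pyGetD arr i 0) 2 = 0 ∧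
              PySem.Int.mod (PySem.List.pyGetD arr (i + 1) 0) 2 = 0) with hP
    have hstep : (fun (st : Int × Int) idx =>
        if PySem.Int.mod (PySem.List.pyGetD arr idx 0) 2 = 0 ∧
           PySem.Int.mod (PySem.List.pyGetD arr (idx + 1) 0) 2 = 0 then
          ((1 : Int), max st.2 st.1)
        else (st.1 + 1, st.2)) = pvStep P := by
      funext st i
      simp [pvStep, hP]
    have hn : ((arr.length : Int) - 1) = 0 + ((arr.length - 1 : Nat) : Int) := by
      have : 1 ≤ arr.length := by simp [harr]
      push_cast [this]; omega
    have hmain := pvMain P (arr.length - 1) 0 (-1) 1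
    simp only [pvPairs, List.cons_append, List.tail_cons,
      show (0 : Int) - (-1) = (1 : Int) from by ring] at hmain
    simp only [PySem.List.slice_from_one, List.cons_append, List.tail_cons]
    rw [hstep, hn]
    exact hmain
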